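-- pv_equiv track=rewrite | github.com/egenerat/challenges | cgx-formatter.py | are_parentheses_balanced
-- ===== SOURCE A (Python) =====
-- def are_parentheses_balanced(text):
--     sub_blocks = text.split(";")
--     opening_parentheses = sub_blocks[0].count("(")
--     closing_parentheses = sub_blocks[0].count(")")
--     if not opening_parentheses:
--         return False
--     for i in sub_blocks[1:]:
--         if i.count("(") != opening_parentheses or i.count(")") != closing_parentheses:
--             return False
--     return True
-- ===== SOURCE B (Python) =====
-- def are_parentheses_balanced(text):
--     # Single character-level pass (state machine); no split(), no per-block count() passes.
--     first = None          # (open, close) counts of the first block, set at its terminating ';'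
--     op = cl = 0
--     ok = True
--     for ch in text + ";":
--         if ch == ";":
--             if first is None:
--                 first = (op, cl)
--             elif (op, cl) != first:
--                 ok = False
--             op = cl = 0
--         elif ch == "(":
--             op += 1
--         elif ch == ")":
--             cl += 1
--     return ok and first[0] > 0
-- ===== Notes on version B (the rewrite author's own statement) =====
-- stated objective: alternative
-- what changed: Replaces A's split-into-blocks plus per-block substring-count passes by a single character-level scan: a state machine over text+';' that accumulates the current block's counts, latches the first block's pair at its ';', and flags any later mismatch.
import Mathlib
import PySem

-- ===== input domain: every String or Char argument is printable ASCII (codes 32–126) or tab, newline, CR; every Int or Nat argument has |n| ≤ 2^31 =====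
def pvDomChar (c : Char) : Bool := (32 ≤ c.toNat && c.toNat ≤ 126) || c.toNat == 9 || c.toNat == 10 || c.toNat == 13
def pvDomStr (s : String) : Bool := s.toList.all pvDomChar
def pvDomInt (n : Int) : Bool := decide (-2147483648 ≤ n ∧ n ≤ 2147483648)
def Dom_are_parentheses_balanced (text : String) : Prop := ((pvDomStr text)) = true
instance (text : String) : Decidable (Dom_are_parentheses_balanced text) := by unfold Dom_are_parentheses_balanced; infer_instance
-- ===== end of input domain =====

-- B replaces A's split-into-blocks plus per-block substring-count passes by ONE character-level
-- scan with an accumulator (a small state machine); objective: alternative decomposition.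

-- ===== PORT A =====
def are_parentheses_balanced (text : String) : Bool :=
  match PySem.Str.split? text ";" with
  | none => false            -- unreachable: the separator ";" is non-empty
  | some [] => false         -- unreachable: str.split always returns at least one block
  | some (b0 :: rest) =>
    let opening_parentheses := PySem.Str.count b0 "("
    let closing_parentheses := PySem.Str.count b0 ")"
    if opening_parentheses = 0 then false
    else rest.all fun i =>
      PySem.Str.count i "(" == opening_parentheses && PySem.Str.count i ")" == closing_parentheses

-- ===== PORT B =====
-- one step of Source B's loop body; state = (first, op, cl, ok)
def pvStepB (st : Option (Nat × Nat) × Nat × Nat × Bool) (ch : Char) :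
    Option (Nat × Nat) × Nat × Nat × Bool :=
  let (first, op, cl, ok) := st
  if ch = ';' then
    match first with
    | none => (some (op, cl), 0, 0, ok)
    | some f => (some f, 0, 0, if (op, cl) != f then false else ok)
  else if ch = '(' then (first, op + 1, cl, ok)
  else if ch = ')' then (first, op, cl + 1, ok)
  else (first, op, cl, ok)

def are_parentheses_balanced_alt (text : String) : Bool :=
  -- 'for ch in text + ";": …' then 'return ok and first[0] > 0'
  match (text.toList ++ [';']).foldl pvStepB (none, 0, 0, true) with
  | (some f, _, _, ok) => ok && decide (0 < f.1)
  | (none, _, _, _) => false   -- unreachable: the appended ';' always sets first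

-- ===== PRECONDITION & SPEC =====
def Spec_are_parentheses_balanced (text : String) (out : Bool) : Prop := out = are_parentheses_balanced_alt text
instance (text : String) (out : Bool) : Decidable (Spec_are_parentheses_balanced text out) := by unfold Spec_are_parentheses_balanced; infer_instance

-- ===== CLAIM (what is proved, stated in full; the proofs are below) =====
def Claim_equal_are_parentheses_balanced : Prop := ∀ (text : String), Dom_are_parentheses_balanced text → Spec_are_parentheses_balanced text (are_parentheses_balanced text)

-- ===== LEMMAS AND PROOFS =====

-- reference splitter: (first block, remaining blocks) of splitting on ';'
def pvSplitSemis : List Char → List Char × List (List Char)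
  | [] => ([], [])
  | c :: cs =>
    let (b, bs) := pvSplitSemis cs
    if c = ';' then ([], b :: bs) else (c :: b, bs)

theorem pv_splitOn_go (fuel : Nat) (l cur : List Char) (acc : List (List Char))
    (h : l.length ≤ fuel) :
    PySem.Chars.splitOn.go [';'] fuel l cur acc =
      acc.reverse ++ (cur.reverse ++ (pvSplitSemis l).1) :: (pvSplitSemis l).2 := by
  induction fuel generalizing l cur acc with
  | zero =>
    interval_cases hl : l.length
    · simp at hl
      subst hl
      simp [PySem.Chars.splitOn.go, pvSplitSemis]
  | succ fuel ih =>
    cases l with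
    | nil => simp [PySem.Chars.splitOn.go, pvSplitSemis]
    | cons c cs =>
      by_cases hc : c = ';'
      · subst hc
        have hpre : [';'].isPrefixOf (';' :: cs) = true := by simp [List.isPrefixOf]
        have hdrop : List.drop [';'].length (';' :: cs) = cs := by simp
        simp only [PySem.Chars.splitOn.go, hpre, if_true, hdrop]
        rw [ih cs [] (cur.reverse :: acc) (by simpa using Nat.lt_succ_iff.mp (by simpa using h))]
        simp [pvSplitSemis]
      · have hpre : [';'].isPrefixOf (c :: cs) = false := by
          simp [List.isPrefixOf]
          intro hc'; exact absurd hc'.symm hc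
        simp only [PySem.Chars.splitOn.go, hpre, Bool.false_eq_true, if_false]
        rw [ih cs (c :: cur) acc (by simpa using Nat.lt_succ_iff.mp (by simpa using h))]
        simp [pvSplitSemis, hc]
      
theorem pv_splitOn_semi (cs : List Char) :
    PySem.Chars.splitOn cs [';'] = (pvSplitSemis cs).1 :: (pvSplitSemis cs).2 := by
  unfold PySem.Chars.splitOn
  rw [pv_splitOn_go (cs.length + 1) cs [] [] (by omega)]
  simp

theorem pv_count_go (c : Char) (fuel : Nat) (l : List Char) (acc : Nat)
    (h : l.length ≤ fuel) :
    PySem.Chars.count.go [c] fuel l acc = acc + l.count c := by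
  induction fuel generalizing l acc with
  | zero =>
    interval_cases hl : l.length
    · simp at hl
      subst hl
      simp [PySem.Chars.count.go]
  | succ fuel ih =>
    cases l with
    | nil => simp [PySem.Chars.count.go]
    | cons d t =>
      have hlen : t.length ≤ fuel := by simpa using Nat.lt_succ_iff.mp (by simpa using h)
      by_cases hd : c = d
      · subst hd
        have hpre : [c].isPrefixOf (c :: t) = true := by simp [List.isPrefixOf]
        have hdrop : List.drop [c].length (c :: t) = t := by simp
        simp only [PySem.Chars.count.go, hpre, if_true, hdrop]
        rw [ih t (acc + 1) hlen]
        simp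
        omega
      · have hpre : [c].isPrefixOf (d :: t) = false := by
          simp [List.isPrefixOf]
          intro hc'; exact absurd hc' hd
        simp only [PySem.Chars.count.go, hpre, Bool.false_eq_true, if_false]
        rw [ih t acc hlen]
        have : (d == c) = false := by simp; intro hc'; exact absurd hc'.symm hd
        simp [List.count_cons, this]

theorem pv_count_single (l : List Char) (c : Char) :
    PySem.Chars.count l [c] = l.count c := by
  unfold PySem.Chars.count
  rw [if_neg (by simp), pv_count_go c l.length l 0 le_rfl]
  omega

-- pair of parenthesis counts of a block
def pvPair (b : List Char) : Nat × Nat := (b.count '(', b.count ')')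

-- B's loop once 'first' is set: remaining ok-checks against f
theorem pv_fold_some (cs : List Char) (f : Nat × Nat) (op cl : Nat) (ok : Bool) :
    (cs ++ [';']).foldl pvStepB (some f, op, cl, ok) =
      (some f, 0, 0,
        ok && (((op + (pvSplitSemis cs).1.count '(', cl + (pvSplitSemis cs).1.count ')') == f)
          && (pvSplitSemis cs).2.all (fun x => pvPair x == f))) := by
  induction cs generalizing op cl ok with
  | nil =>
    simp only [List.nil_append, List.foldl_cons, List.foldl_nil]
    have hstep : pvStepB (some f, op, cl, ok) ';' =
        (some f, 0, 0, if (op, cl) != f then false else ok) := by simp [pvStepB]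
    rw [hstep]
    simp only [pvSplitSemis, List.count_nil, Nat.add_zero, List.all_nil, Bool.and_true]
    cases hq : ((op, cl) == f) <;> cases ok <;> simp [bne, hq]
  | cons c t ih =>
    by_cases hc : c = ';'
    · subst hc
      simp only [List.cons_append, List.foldl_cons]
      have hstep : pvStepB (some f, op, cl, ok) ';' =
          (some f, 0, 0, if (op, cl) != f then false else ok) := by simp [pvStepB]
      rw [hstep, ih 0 0 _]
      simp only [pvSplitSemis, Nat.zero_add, pvPair]
      cases hq : ((op, cl) == f) <;> cases ok <;> simp [bne, hq]
    · have hstep : pvStepB (some f, op, cl, ok) c =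
        (some f, (if c = '(' then op + 1 else op), (if c = ')' then cl + 1 else cl), ok) := by
        by_cases h1 : c = '(' <;> by_cases h2 : c = ')' <;> simp_all [pvStepB]
      simp only [List.cons_append, List.foldl_cons, hstep]
      rw [ih]
      have hsplit : pvSplitSemis (c :: t) = (c :: (pvSplitSemis t).1, (pvSplitSemis t).2) := by
        simp [pvSplitSemis, hc]
      rw [hsplit]
      have hop : (if c = '(' then op + 1 else op) + (pvSplitSemis t).1.count '('
          = op + (c :: (pvSplitSemis t).1).count '(' := by
        by_cases h1 : c = '(' <;> simp [h1] <;> omega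
      have hclx : (if c = ')' then cl + 1 else cl) + (pvSplitSemis t).1.count ')'
          = cl + (c :: (pvSplitSemis t).1).count ')' := by
        by_cases h2 : c = ')' <;> simp [h2] <;> omega
      rw [hop, hclx]

-- B's loop before 'first' is set
theorem pv_fold_none (cs : List Char) (op cl : Nat) :
    (cs ++ [';']).foldl pvStepB (none, op, cl, true) =
      (some (op + (pvSplitSemis cs).1.count '(', cl + (pvSplitSemis cs).1.count ')'), 0, 0,
        (pvSplitSemis cs).2.all (fun x =>
          pvPair x == (op + (pvSplitSemis cs).1.count '(', cl + (pvSplitSemis cs).1.count ')'))) := by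
  induction cs generalizing op cl with
  | nil =>
    simp only [List.nil_append, List.foldl_cons, List.foldl_nil]
    have hstep : pvStepB (none, op, cl, true) ';' = (some (op, cl), 0, 0, true) := by
      simp [pvStepB]
    rw [hstep]
    simp [pvSplitSemis]
  | cons c t ih =>
    by_cases hc : c = ';'
    · subst hc
      simp only [List.cons_append, List.foldl_cons]
      have hstep : pvStepB (none, op, cl, true) ';' = (some (op, cl), 0, 0, true) := by
        simp [pvStepB]
      rw [hstep, pv_fold_some]
      simp [pvSplitSemis, pvPair]
    · have hstep : pvStepB (none, op, cl, true) c =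
        (none, (if c = '(' then op + 1 else op), (if c = ')' then cl + 1 else cl), true) := by
        by_cases h1 : c = '(' <;> by_cases h2 : c = ')' <;> simp_all [pvStepB]
      simp only [List.cons_append, List.foldl_cons, hstep]
      rw [ih]
      have hsplit : pvSplitSemis (c :: t) = (c :: (pvSplitSemis t).1, (pvSplitSemis t).2) := by
        simp [pvSplitSemis, hc]
      rw [hsplit]
      have hop : (if c = '(' then op + 1 else op) + (pvSplitSemis t).1.count '('
          = op + (c :: (pvSplitSemis t).1).count '(' := by
        by_cases h1 : c = '(' <;> simp [h1] <;> omega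
      have hclx : (if c = ')' then cl + 1 else cl) + (pvSplitSemis t).1.count ')'
          = cl + (c :: (pvSplitSemis t).1).count ')' := by
        by_cases h2 : c = ')' <;> simp [h2] <;> omega
      rw [hop, hclx]

-- ===== VERDICT (by name: the statement is the Claim_ definition above) =====
theorem are_parentheses_balanced_spec : Claim_equal_are_parentheses_balanced := by
  intro text _
  unfold Spec_are_parentheses_balanced are_parentheses_balanced are_parentheses_balanced_alt
  have hsplit : PySem.Str.split? text ";" =
      some (String.ofList (pvSplitSemis text.toList).1 ::
        ((pvSplitSemis text.toList).2.map String.ofList)) := by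
    simp [PySem.Str.split?, PySem.Chars.split?, pv_splitOn_semi]
  rw [hsplit, pv_fold_none text.toList 0 0]
  simp only [Nat.zero_add]
  set b := (pvSplitSemis text.toList).1
  set bs := (pvSplitSemis text.toList).2
  have hcnt : ∀ (l : List Char) (c : Char),
      PySem.Str.count (String.ofList l) (String.ofList [c]) = l.count c := by
    intro l c
    rw [PySem.Str.count_eq]
    simp [pv_count_single]
  have hop : PySem.Str.count (String.ofList b) "(" = b.count '(' := hcnt b '('
  have hcl : PySem.Str.count (String.ofList b) ")" = b.count ')' := hcnt b ')'
  simp only [hop, hcl]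
  by_cases h0 : b.count '(' = 0
  · simp [h0]
  · rw [if_neg h0]
    simp only [h0, decide_eq_true (Nat.pos_of_ne_zero h0), Bool.and_true]
    rw [List.all_map]
    congr 1
    funext x
    have hb : ∀ (m1 m2 n1 n2 : Nat), ((m1, m2) == (n1, n2)) = (m1 == n1 && m2 == n2) := fun _ _ _ _ => rfl
    simp [pv_count_single, pvPair, hb]
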